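-- pv_equiv track=rewrite | github.com/allanRoberto/revesbot-final | apps/signals/patterns/analise.py | find_anchors
-- ===== SOURCE A (Python) =====
-- from typing import List, Dict, Set, Tuple, Optional
--
-- def find_anchors(numbers: List[int]) -> List[int]:
--     """
--     Camada 2: Âncoras estatísticas.
--     Réplica exata do JS.
--     """
--     counts = {}
--
--     # JS: for (let i = 0; i < numbers.length - 2; i++)
--     for i in range(len(numbers) - 2):
--         window = numbers[i:i + 10]
--         unique = list(set(window))
--
--         for num in unique:
--             appearances = window.count(num)
--             if appearances >= 2:
--                 counts[num] = counts.get(num, 0) + 1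
--
--     # Ordenar por contagem decrescente
--     sorted_items = sorted(counts.items(), key=lambda x: (-x[1], x[0]))
--     return [num for num, _ in sorted_items[:6]]
-- ===== SOURCE B (Python) =====
-- def find_anchors(numbers):
--     """One pass over the input, no window loop: for each index k whose value has a
--     previous occurrence p (and earlier one pp), the windows in which k is the second
--     in-window occurrence of its value form the interval
--     [max(k-9, pp+1, 0), min(p, n-3)]; its length is added to counts[value].
--     Same (-count, num) ordering and top-6 cut as before."""
--     n = len(numbers)
--     counts = {}
--     last = {}  # value -> (index of last occurrence, index of occurrence before that or -1)
--     for k, v in enumerate(numbers):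
--         if v in last:
--             p, pp = last[v]
--             lo = max(k - 9, pp + 1, 0)
--             hi = min(p, n - 3)
--             if lo <= hi:
--                 counts[v] = counts.get(v, 0) + (hi - lo + 1)
--             last[v] = (k, p)
--         else:
--             last[v] = (k, -1)
--     best = sorted(counts.items(), key=lambda kv: (-kv[1], kv[0]))[:6]
--     return [v for v, _ in best]
-- ===== Notes on version B (the rewrite author's own statement) =====
-- stated objective: faster
-- what changed: B eliminates A's sliding-window loop entirely: a single pass keeps each value's last two occurrence indices and adds, per repeated occurrence, the closed-form length of the interval of window starts in which it is the second in-window occurrence; the (-count, num) sort and top-6 cut are unchanged.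
import Mathlib
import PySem

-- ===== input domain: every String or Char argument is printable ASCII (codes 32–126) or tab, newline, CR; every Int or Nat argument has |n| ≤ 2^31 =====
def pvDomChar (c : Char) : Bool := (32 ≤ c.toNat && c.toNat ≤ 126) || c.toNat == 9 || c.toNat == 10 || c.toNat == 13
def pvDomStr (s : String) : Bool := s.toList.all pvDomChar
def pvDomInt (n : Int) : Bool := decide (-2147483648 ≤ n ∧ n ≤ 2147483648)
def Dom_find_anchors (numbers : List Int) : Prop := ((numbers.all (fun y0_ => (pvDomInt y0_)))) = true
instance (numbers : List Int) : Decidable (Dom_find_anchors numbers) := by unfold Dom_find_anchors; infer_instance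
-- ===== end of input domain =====

-- B removes A's window loop: one pass over the input adds, for each repeated value,
-- the length of the closed-form interval of window starts where that occurrence is the
-- second in-window one; same (-count, num) sort and top-6 cut.

-- ===== PORT A =====
-- A's inner loop: for num in unique: appearances = window.count(num); if appearances >= 2: counts[num] = counts.get(num,0)+1
-- (Python's set iteration order is hash order; the counts dict's insertion order does not affect the
--  returned list, whose order is fixed by the injective sort key (-count, num); ported in first-occurrence order.)
def pvInnerA (window : List Int) (counts : PySem.Dict Int Int) : PySem.Dict Int Int :=
  (PySem.Set.ofList window).foldl (fun counts num =>
    let appearances : Int := PySem.List.count window num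
    if 2 ≤ appearances then counts.insert num (counts.getD num 0 + 1) else counts) counts

def find_anchors (numbers : List Int) : List Int :=
  let counts := (PySem.List.pyRange 0 ((numbers.length : Int) - 2) 1).foldl
    (fun counts i => pvInnerA (PySem.List.slice numbers (some i) (some (i + 10))) counts)
    PySem.Dict.empty
  let sorted_items := PySem.List.sorted2 counts.items (fun x => -x.2) (fun x => x.1)
  (sorted_items.take 6).map (fun p => p.1)

-- ===== PORT B =====
-- Source B's loop body: on (k, v), if v in last: p, pp = last[v]; lo = max(k-9, pp+1, 0);
-- hi = min(p, n-3); if lo <= hi: counts[v] += hi-lo+1; last[v] = (k, p)  else last[v] = (k, -1)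
def pvStepB (n : Int) (st : PySem.Dict Int Int × PySem.Dict Int (Int × Int)) (kv : Int × Int) :
    PySem.Dict Int Int × PySem.Dict Int (Int × Int) :=
  match st.2.get? kv.2 with
  | some pq =>
      let lo := max (max (kv.1 - 9) (pq.2 + 1)) 0
      let hi := min pq.1 (n - 3)
      ((if lo ≤ hi then st.1.insert kv.2 (st.1.getD kv.2 0 + (hi - lo + 1)) else st.1),
       st.2.insert kv.2 (kv.1, pq.1))
  | none => (st.1, st.2.insert kv.2 (kv.1, -1))

def find_anchors_alt (numbers : List Int) : List Int :=
  let n : Int := numbers.length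
  let st := (PySem.List.enumerate numbers).foldl (pvStepB n) (PySem.Dict.empty, PySem.Dict.empty)
  let best := (PySem.List.sorted2 st.1.items (fun kv => -kv.2) (fun kv => kv.1)).take 6
  best.map (fun kv => kv.1)

-- ===== PRECONDITION & SPEC =====
def Spec_find_anchors (numbers : List Int) (out : List Int) : Prop := out = find_anchors_alt numbers
instance (numbers : List Int) (out : List Int) : Decidable (Spec_find_anchors numbers out) := by unfold Spec_find_anchors; infer_instance

-- ===== CLAIM (what is proved, stated in full; the proofs are below) =====
def Claim_equal_find_anchors : Prop := ∀ (numbers : List Int), Dom_find_anchors numbers → Spec_find_anchors numbers (find_anchors numbers)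

-- ===== LEMMAS AND PROOFS =====

/- ---------- specification functions (proof-side only) ---------- -/

-- index of the last occurrence of v strictly before position m (as A/B see the list: xs.getD j 0)
def prevOcc (xs : List Int) (v : Int) : Nat → Option Nat
  | 0 => none
  | m + 1 => if xs.getD m 0 = v then some m else prevOcc xs v m

-- the "-1 sentinel" previous-previous occurrence, as Source B stores it
def ppOf (xs : List Int) (v : Int) (p : Nat) : Int :=
  match prevOcc xs v p with
  | none => -1
  | some r => (r : Int)

-- the pair Source B keeps in last[v] after the first m elements
def lastTwo (xs : List Int) (m : Nat) (v : Int) : Option (Int × Int) :=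
  match prevOcc xs v m with
  | none => none
  | some p => some ((p : Int), ppOf xs v p)

-- Source B's addition to counts[xs[k]] at index k
def contribAt (xs : List Int) (k : Nat) : Int :=
  match prevOcc xs (xs.getD k 0) k with
  | none => 0
  | some p =>
      let lo := max (max ((k : Int) - 9) (ppOf xs (xs.getD k 0) p + 1)) 0
      let hi := min (p : Int) ((xs.length : Int) - 3)
      if lo ≤ hi then hi - lo + 1 else 0

-- total of counts[v] after the first m elements, per Source B
def bcount (xs : List Int) : Nat → Int → Int
  | 0, _ => 0
  | m + 1, v => bcount xs m v + (if xs.getD m 0 = v then contribAt xs m else 0)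

-- number of windows in which v is duplicated, per A
def acount (xs : List Int) (v : Int) : Nat :=
  (PySem.List.pyRange 0 ((xs.length : Int) - 2) 1).countP
    (fun i => decide ((2 : Int) ≤ (PySem.List.count (PySem.List.slice xs (some i) (some (i + 10))) v : Int)))

-- the interval of window starts in which index k is the second in-window occurrence of v
def Jset (xs : List Int) (v : Int) (k : Nat) : Finset ℕ :=
  if xs.getD k 0 = v then
    match prevOcc xs v k with
    | some p =>
        let lo := max (max ((k : Int) - 9) (ppOf xs v p + 1)) 0
        let hi := min (p : Int) ((xs.length : Int) - 3)
        if lo ≤ hi then Finset.Icc lo.toNat hi.toNat else ∅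
    | none => ∅
  else ∅

def winPred (xs : List Int) (v : Int) (i : Int) : Bool :=
  decide ((2 : Int) ≤ (PySem.List.count (PySem.List.slice xs (some i) (some (i + 10))) v : Int))

/- ---------- A-side extraction ---------- -/

-- the loop body of pvInnerA, named so the fold lemmas can rewrite cleanly (same code)
def stepA (w : List Int) (d : PySem.Dict Int Int) (num : Int) : PySem.Dict Int Int :=
  let appearances : Int := PySem.List.count w num
  if 2 ≤ appearances then d.insert num (d.getD num 0 + 1) else d

lemma pvInnerA_eq_foldl_stepA (w : List Int) (d : PySem.Dict Int Int) :
    pvInnerA w d = (PySem.Set.ofList w).foldl (stepA w) d := rfl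

lemma stepA_eq (w : List Int) (d : PySem.Dict Int Int) (num : Int) :
    stepA w d num = if (2 : Int) ≤ (PySem.List.count w num : Int) then d.insert num (d.getD num 0 + 1) else d := rfl

lemma stepA_getD (w : List Int) (d : PySem.Dict Int Int) (num v : Int) :
    (stepA w d num).getD v 0 = d.getD v 0 + (if v = num ∧ (2 : Int) ≤ (PySem.List.count w v : Int) then 1 else 0) := by
  rw [stepA_eq]
  by_cases hvn : v = num
  · subst hvn
    by_cases hc : (2 : Int) ≤ (PySem.List.count w v : Int)
    · rw [if_pos hc, if_pos ⟨rfl, hc⟩, PySem.Dict.getD_insert_self]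
    · rw [if_neg hc, if_neg (fun h => hc h.2)]
      ring
  · by_cases hc : (2 : Int) ≤ (PySem.List.count w num : Int)
    · rw [if_pos hc, if_neg (fun (h : _ ∧ _) => hvn h.1), PySem.Dict.getD_insert, if_neg hvn]
      ring
    · rw [if_neg hc, if_neg (fun (h : _ ∧ _) => hvn h.1)]
      ring

lemma stepA_mem (w : List Int) (d : PySem.Dict Int Int) (num v : Int) :
    (v ∈ (stepA w d num).keys) ↔ v ∈ d.keys ∨ (v = num ∧ (2 : Int) ≤ (PySem.List.count w num : Int)) := by
  rw [stepA_eq]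
  split_ifs with hc
  · rw [PySem.Dict.mem_keys_insert]
    constructor
    · rintro (h | h)
      · exact Or.inr ⟨h, hc⟩
      · exact Or.inl h
    · rintro (h | h)
      · exact Or.inr h
      · exact Or.inl h.1
  · constructor
    · exact Or.inl
    · rintro (h | h)
      · exact h
      · exact absurd h.2 hc

lemma stepA_nodup (w : List Int) (d : PySem.Dict Int Int) (num : Int) (hd : d.keys.Nodup) :
    (stepA w d num).keys.Nodup := by
  rw [stepA_eq]
  split_ifs with hc
  · exact PySem.Dict.nodup_keys_insert _ _ _ hd
  · exact hd

lemma bump_getD (w s : List Int) (d : PySem.Dict Int Int) (v : Int) (hs : s.Nodup) :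
    (s.foldl (stepA w) d).getD v 0
      = d.getD v 0 + (if v ∈ s ∧ (2 : Int) ≤ (PySem.List.count w v : Int) then 1 else 0) := by
  induction s generalizing d with
  | nil => simp
  | cons x s ih =>
    have hx : x ∉ s := (List.nodup_cons.mp hs).1
    have hs' : s.Nodup := (List.nodup_cons.mp hs).2
    rw [List.foldl_cons, ih _ hs', stepA_getD]
    by_cases hvx : v = x
    · subst hvx
      have hvs : v ∉ s := hx
      by_cases hc : (2 : Int) ≤ (PySem.List.count w v : Int)
      · rw [if_pos ⟨rfl, hc⟩, if_neg (fun h => hvs h.1), if_pos ⟨List.mem_cons_self, hc⟩]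
        ring
      · rw [if_neg (fun h => hc h.2), if_neg (fun h => hc h.2), if_neg (fun h => hc h.2)]
        ring
    · rw [if_neg (fun h => hvx h.1)]
      have hmc : (v ∈ x :: s) ↔ v ∈ s := by
        rw [List.mem_cons]
        exact ⟨fun h => h.resolve_left hvx, Or.inr⟩
      rw [if_congr (and_congr_left' hmc) rfl rfl]
      ring

lemma bump_mem_keys (w s : List Int) (d : PySem.Dict Int Int) (v : Int) :
    (v ∈ (s.foldl (stepA w) d).keys)
      ↔ v ∈ d.keys ∨ (v ∈ s ∧ (2 : Int) ≤ (PySem.List.count w v : Int)) := by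
  induction s generalizing d with
  | nil => simp
  | cons x s ih =>
    rw [List.foldl_cons, ih, stepA_mem]
    by_cases hvx : v = x
    · subst hvx
      constructor
      · rintro ((h | h) | h)
        · exact Or.inl h
        · exact Or.inr ⟨List.mem_cons_self, h.2⟩
        · exact Or.inr ⟨List.mem_cons_self, h.2⟩
      · rintro (h | h)
        · exact Or.inl (Or.inl h)
        · exact Or.inl (Or.inr ⟨rfl, h.2⟩)
    · constructor
      · rintro ((h | h) | h)
        · exact Or.inl h
        · exact absurd h.1 hvx
        · exact Or.inr ⟨List.mem_cons_of_mem _ h.1, h.2⟩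
      · rintro (h | h)
        · exact Or.inl (Or.inl h)
        · refine Or.inr ⟨?_, h.2⟩
          rcases List.mem_cons.mp h.1 with h' | h'
          · exact absurd h' hvx
          · exact h'
  
lemma bump_nodup (w s : List Int) (d : PySem.Dict Int Int) (hd : d.keys.Nodup) :
    (s.foldl (stepA w) d).keys.Nodup := by
  induction s generalizing d with
  | nil => simpa using hd
  | cons x s ih =>
    rw [List.foldl_cons]
    exact ih _ (stepA_nodup w d x hd)

lemma innerA_getD (w : List Int) (d : PySem.Dict Int Int) (v : Int) :
    (pvInnerA w d).getD v 0 = d.getD v 0 + (if (2 : Int) ≤ (PySem.List.count w v : Int) then 1 else 0) := by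
  rw [pvInnerA_eq_foldl_stepA, bump_getD w (PySem.Set.ofList w) d v (PySem.Set.nodup_ofList w)]
  have hiff : (v ∈ PySem.Set.ofList w ∧ (2 : Int) ≤ (PySem.List.count w v : Int))
      ↔ ((2 : Int) ≤ (PySem.List.count w v : Int)) := by
    constructor
    · exact And.right
    · intro h
      refine ⟨?_, h⟩
      rw [PySem.List.count_eq] at h
      have hpos : 0 < w.count v := by omega
      exact (PySem.Set.mem_ofList _ _).mpr (List.count_pos_iff.mp hpos)
  rw [if_congr hiff rfl rfl]

lemma innerA_mem_keys (w : List Int) (d : PySem.Dict Int Int) (v : Int) :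
    (v ∈ (pvInnerA w d).keys) ↔ v ∈ d.keys ∨ (2 : Int) ≤ (PySem.List.count w v : Int) := by
  rw [pvInnerA_eq_foldl_stepA, bump_mem_keys]
  constructor
  · rintro (h | h)
    · exact Or.inl h
    · exact Or.inr h.2
  · rintro (h | h)
    · exact Or.inl h
    · refine Or.inr ⟨?_, h⟩
      rw [PySem.List.count_eq] at h
      have hpos : 0 < w.count v := by omega
      exact (PySem.Set.mem_ofList _ _).mpr (List.count_pos_iff.mp hpos)

lemma innerA_nodup (w : List Int) (d : PySem.Dict Int Int) (hd : d.keys.Nodup) :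
    (pvInnerA w d).keys.Nodup := by
  rw [pvInnerA_eq_foldl_stepA]
  exact bump_nodup _ _ _ hd

lemma afold_getD (xs : List Int) (l : List Int) (d : PySem.Dict Int Int) (v : Int) :
    (l.foldl (fun d i => pvInnerA (PySem.List.slice xs (some i) (some (i + 10))) d) d).getD v 0
      = d.getD v 0 + (l.countP (winPred xs v) : Int) := by
  induction l generalizing d with
  | nil => simp
  | cons x l ih =>
    rw [List.foldl_cons, ih, innerA_getD]
    by_cases h : winPred xs v x = true
    · have h' : (2 : Int) ≤ (PySem.List.count (PySem.List.slice xs (some x) (some (x + 10))) v : Int) := by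
        simpa [winPred] using h
      rw [if_pos h', List.countP_cons_of_pos (pa := h)]
      push_cast
      ring
    · have h' : ¬ (2 : Int) ≤ (PySem.List.count (PySem.List.slice xs (some x) (some (x + 10))) v : Int) := by
        simpa [winPred] using h
      rw [if_neg h', List.countP_cons_of_neg (pa := h)]
      ring

lemma afold_mem (xs : List Int) (l : List Int) (d : PySem.Dict Int Int) (v : Int) :
    (v ∈ (l.foldl (fun d i => pvInnerA (PySem.List.slice xs (some i) (some (i + 10))) d) d).keys)
      ↔ v ∈ d.keys ∨ 0 < l.countP (winPred xs v) := by
  induction l generalizing d with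
  | nil => simp
  | cons x l ih =>
    rw [List.foldl_cons, ih, innerA_mem_keys]
    by_cases h : winPred xs v x = true
    · have h' : (2 : Int) ≤ (PySem.List.count (PySem.List.slice xs (some x) (some (x + 10))) v : Int) := by
        simpa [winPred] using h
      rw [List.countP_cons_of_pos (pa := h)]
      constructor
      · rintro ((hd | hC) | hl)
        · exact Or.inl hd
        · exact Or.inr (by omega)
        · exact Or.inr (by omega)
      · rintro (hd | hl)
        · exact Or.inl (Or.inl hd)
        · exact Or.inl (Or.inr h')
    · have h' : ¬ (2 : Int) ≤ (PySem.List.count (PySem.List.slice xs (some x) (some (x + 10))) v : Int) := by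
        simpa [winPred] using h
      rw [List.countP_cons_of_neg (pa := h)]
      constructor
      · rintro ((hd | hC) | hl)
        · exact Or.inl hd
        · exact absurd hC h'
        · exact Or.inr hl
      · rintro (hd | hl)
        · exact Or.inl (Or.inl hd)
        · exact Or.inr hl

lemma afold_nodup (xs : List Int) (l : List Int) (d : PySem.Dict Int Int) (hd : d.keys.Nodup) :
    (l.foldl (fun d i => pvInnerA (PySem.List.slice xs (some i) (some (i + 10))) d) d).keys.Nodup := by
  induction l generalizing d with
  | nil => simpa using hd
  | cons x l ih =>
    rw [List.foldl_cons]
    exact ih _ (innerA_nodup _ _ hd)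

/- ---------- B-side extraction ---------- -/

lemma enumerate_eq_map_range (xs : List Int) (s : Int) :
    PySem.List.enumerate xs s = (List.range xs.length).map (fun (j : Nat) => (s + (j : Int), xs.getD j 0)) := by
  induction xs generalizing s with
  | nil => simp [PySem.List.enumerate_nil]
  | cons x xs ih =>
    rw [PySem.List.enumerate_cons, ih (s + 1)]
    simp only [List.length_cons, List.range_succ_eq_map, List.map_cons, List.map_map]
    congr 1
    · simp
    · apply List.map_congr_left
      intro j hj
      simp only [Function.comp_apply, Nat.succ_eq_add_one, List.getD_cons_succ]
      congr 1
      push_cast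
      ring

lemma contribAt_nonneg (xs : List Int) (k : Nat) : 0 ≤ contribAt xs k := by
  unfold contribAt
  cases h : prevOcc xs (xs.getD k 0) k with
  | none => simp
  | some p =>
    simp only []
    split_ifs with hlh
    · omega
    · omega

lemma bcount_nonneg (xs : List Int) (m : Nat) (v : Int) : 0 ≤ bcount xs m v := by
  induction m with
  | zero => simp [bcount]
  | succ m ih =>
    simp only [bcount]
    have := contribAt_nonneg xs m
    split_ifs <;> omega

lemma lastTwo_succ (xs : List Int) (m : Nat) (v : Int) :
    lastTwo xs (m + 1) v = if xs.getD m 0 = v then some ((m : Int), ppOf xs v m) else lastTwo xs m v := by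
  unfold lastTwo
  simp only [prevOcc]
  split_ifs with h
  · rfl
  · rfl

lemma lastTwo_none_iff (xs : List Int) (m : Nat) (v : Int) :
    lastTwo xs m v = none ↔ prevOcc xs v m = none := by
  unfold lastTwo
  cases prevOcc xs v m <;> simp

lemma ppOf_of_lastTwo (xs : List Int) (m : Nat) (v : Int) (pq : Int × Int)
    (h : lastTwo xs m v = some pq) : ppOf xs v m = pq.1 := by
  unfold lastTwo at h
  unfold ppOf
  cases hp : prevOcc xs v m with
  | none => rw [hp] at h; cases h
  | some p =>
    rw [hp] at h
    simp only [Option.some.injEq] at h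
    rw [← h]

lemma contribAt_eq (xs : List Int) (m : Nat) :
    contribAt xs m = (match lastTwo xs m (xs.getD m 0) with
      | none => 0
      | some pq =>
          let lo := max (max ((m : Int) - 9) (pq.2 + 1)) 0
          let hi := min pq.1 ((xs.length : Int) - 3)
          if lo ≤ hi then hi - lo + 1 else 0) := by
  unfold contribAt lastTwo
  cases prevOcc xs (xs.getD m 0) m <;> rfl

lemma step_inv (xs : List Int) (m : Nat) (st : PySem.Dict Int Int × PySem.Dict Int (Int × Int))
    (h1 : ∀ v, st.2.get? v = lastTwo xs m v) (h2 : ∀ v, st.1.getD v 0 = bcount xs m v)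
    (h3 : ∀ v, (v ∈ st.1.keys) ↔ 0 < bcount xs m v) (h4 : st.1.keys.Nodup) :
    (∀ v, (pvStepB (xs.length : Int) st ((m : Int), xs.getD m 0)).2.get? v = lastTwo xs (m + 1) v) ∧
      (∀ v, (pvStepB (xs.length : Int) st ((m : Int), xs.getD m 0)).1.getD v 0 = bcount xs (m + 1) v) ∧
      (∀ v, (v ∈ (pvStepB (xs.length : Int) st ((m : Int), xs.getD m 0)).1.keys) ↔ 0 < bcount xs (m + 1) v) ∧
      (pvStepB (xs.length : Int) st ((m : Int), xs.getD m 0)).1.keys.Nodup := by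
  have hbc : ∀ v, bcount xs (m + 1) v = bcount xs m v + (if xs.getD m 0 = v then contribAt xs m else 0) :=
    fun v => rfl
  cases hl : lastTwo xs m (xs.getD m 0) with
  | none =>
    have hget : st.2.get? (xs.getD m 0) = none := by rw [h1 (xs.getD m 0), hl]
    have hprev : prevOcc xs (xs.getD m 0) m = none := (lastTwo_none_iff _ _ _).mp hl
    have hcontrib : contribAt xs m = 0 := by rw [contribAt_eq, hl]
    have hstep : pvStepB (xs.length : Int) st ((m : Int), xs.getD m 0)
        = (st.1, st.2.insert (xs.getD m 0) ((m : Int), -1)) := by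
      unfold pvStepB
      rw [hget]
    rw [hstep]
    refine ⟨?_, ?_, ?_, h4⟩
    · intro v
      show (st.2.insert (xs.getD m 0) ((m : Int), -1)).get? v = lastTwo xs (m + 1) v
      rw [lastTwo_succ]
      by_cases hvv : xs.getD m 0 = v
      · rw [if_pos hvv, ← hvv, PySem.Dict.get?_insert_self]
        unfold ppOf
        rw [hprev]
      · rw [if_neg hvv, PySem.Dict.get?_insert, if_neg (fun h => hvv h.symm), h1 v]
    · intro v
      show st.1.getD v 0 = bcount xs (m + 1) v
      rw [hbc v, h2 v]
      split_ifs with hvv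
      · rw [hcontrib]; ring
      · ring
    · intro v
      show (v ∈ st.1.keys) ↔ 0 < bcount xs (m + 1) v
      rw [hbc v, h3 v]
      split_ifs with hvv
      · rw [hcontrib]; omega
      · omega
  | some pq =>
    have hget : st.2.get? (xs.getD m 0) = some pq := by rw [h1 (xs.getD m 0), hl]
    have hpp : ppOf xs (xs.getD m 0) m = pq.1 := ppOf_of_lastTwo xs m _ pq hl
    have hcontrib : contribAt xs m =
        (if max (max ((m : Int) - 9) (pq.2 + 1)) 0 ≤ min pq.1 ((xs.length : Int) - 3) then
          min pq.1 ((xs.length : Int) - 3) - max (max ((m : Int) - 9) (pq.2 + 1)) 0 + 1 else 0) := by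
      rw [contribAt_eq, hl]
    have hstep : pvStepB (xs.length : Int) st ((m : Int), xs.getD m 0)
        = ((if max (max ((m : Int) - 9) (pq.2 + 1)) 0 ≤ min pq.1 ((xs.length : Int) - 3) then
              st.1.insert (xs.getD m 0) (st.1.getD (xs.getD m 0) 0 +
                (min pq.1 ((xs.length : Int) - 3) - max (max ((m : Int) - 9) (pq.2 + 1)) 0 + 1))
            else st.1),
           st.2.insert (xs.getD m 0) ((m : Int), pq.1)) := by
      unfold pvStepB
      rw [hget]
    rw [hstep]
    by_cases hlh : max (max ((m : Int) - 9) (pq.2 + 1)) 0 ≤ min pq.1 ((xs.length : Int) - 3)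
    · refine ⟨?_, ?_, ?_, ?_⟩
      · intro v
        show (st.2.insert (xs.getD m 0) ((m : Int), pq.1)).get? v = lastTwo xs (m + 1) v
        rw [lastTwo_succ]
        by_cases hvv : xs.getD m 0 = v
        · rw [if_pos hvv, ← hvv, PySem.Dict.get?_insert_self, hpp]
        · rw [if_neg hvv, PySem.Dict.get?_insert, if_neg (fun h => hvv h.symm), h1 v]
      · intro v
        show (if max (max ((m : Int) - 9) (pq.2 + 1)) 0 ≤ min pq.1 ((xs.length : Int) - 3) then
              st.1.insert (xs.getD m 0) (st.1.getD (xs.getD m 0) 0 +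
                (min pq.1 ((xs.length : Int) - 3) - max (max ((m : Int) - 9) (pq.2 + 1)) 0 + 1))
            else st.1).getD v 0 = bcount xs (m + 1) v
        rw [if_pos hlh, hbc v, PySem.Dict.getD_insert]
        by_cases hvv : xs.getD m 0 = v
        · rw [if_pos hvv.symm, if_pos hvv, hcontrib, if_pos hlh, hvv, h2 v]
        · rw [if_neg (fun h => hvv h.symm), if_neg hvv, h2 v]
          ring
      · intro v
        show (v ∈ (if max (max ((m : Int) - 9) (pq.2 + 1)) 0 ≤ min pq.1 ((xs.length : Int) - 3) then
              st.1.insert (xs.getD m 0) (st.1.getD (xs.getD m 0) 0 +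
                (min pq.1 ((xs.length : Int) - 3) - max (max ((m : Int) - 9) (pq.2 + 1)) 0 + 1))
            else st.1).keys) ↔ 0 < bcount xs (m + 1) v
        rw [if_pos hlh, hbc v, PySem.Dict.mem_keys_insert]
        by_cases hvv : xs.getD m 0 = v
        · rw [if_pos hvv, hcontrib, if_pos hlh]
          have hnn := bcount_nonneg xs m v
          constructor
          · intro _; omega
          · intro _; exact Or.inl hvv.symm
        · rw [if_neg hvv, h3 v]
          constructor
          · rintro (h | h)
            · exact absurd h.symm hvv
            · omega
          · intro h; exact Or.inr (by omega)
      · show (if max (max ((m : Int) - 9) (pq.2 + 1)) 0 ≤ min pq.1 ((xs.length : Int) - 3) then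
              st.1.insert (xs.getD m 0) (st.1.getD (xs.getD m 0) 0 +
                (min pq.1 ((xs.length : Int) - 3) - max (max ((m : Int) - 9) (pq.2 + 1)) 0 + 1))
            else st.1).keys.Nodup
        rw [if_pos hlh]
        exact PySem.Dict.nodup_keys_insert _ _ _ h4
    · refine ⟨?_, ?_, ?_, ?_⟩
      · intro v
        show (st.2.insert (xs.getD m 0) ((m : Int), pq.1)).get? v = lastTwo xs (m + 1) v
        rw [lastTwo_succ]
        by_cases hvv : xs.getD m 0 = v
        · rw [if_pos hvv, ← hvv, PySem.Dict.get?_insert_self, hpp]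
        · rw [if_neg hvv, PySem.Dict.get?_insert, if_neg (fun h => hvv h.symm), h1 v]
      · intro v
        show (if max (max ((m : Int) - 9) (pq.2 + 1)) 0 ≤ min pq.1 ((xs.length : Int) - 3) then
              st.1.insert (xs.getD m 0) (st.1.getD (xs.getD m 0) 0 +
                (min pq.1 ((xs.length : Int) - 3) - max (max ((m : Int) - 9) (pq.2 + 1)) 0 + 1))
            else st.1).getD v 0 = bcount xs (m + 1) v
        rw [if_neg hlh, hbc v, h2 v]
        split_ifs with hvv
        · rw [hcontrib, if_neg hlh]; ring
        · ring
      · intro v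
        show (v ∈ (if max (max ((m : Int) - 9) (pq.2 + 1)) 0 ≤ min pq.1 ((xs.length : Int) - 3) then
              st.1.insert (xs.getD m 0) (st.1.getD (xs.getD m 0) 0 +
                (min pq.1 ((xs.length : Int) - 3) - max (max ((m : Int) - 9) (pq.2 + 1)) 0 + 1))
            else st.1).keys) ↔ 0 < bcount xs (m + 1) v
        rw [if_neg hlh, hbc v, h3 v]
        split_ifs with hvv
        · rw [hcontrib, if_neg hlh]; omega
        · omega
      · show (if max (max ((m : Int) - 9) (pq.2 + 1)) 0 ≤ min pq.1 ((xs.length : Int) - 3) then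
              st.1.insert (xs.getD m 0) (st.1.getD (xs.getD m 0) 0 +
                (min pq.1 ((xs.length : Int) - 3) - max (max ((m : Int) - 9) (pq.2 + 1)) 0 + 1))
            else st.1).keys.Nodup
        rw [if_neg hlh]
        exact h4

lemma bfold_inv (xs : List Int) (m : Nat) :
    let st := ((List.range m).map (fun (j : Nat) => ((j : Int), xs.getD j 0))).foldl
        (pvStepB (xs.length : Int)) (PySem.Dict.empty, PySem.Dict.empty)
    (∀ v, st.2.get? v = lastTwo xs m v) ∧ (∀ v, st.1.getD v 0 = bcount xs m v) ∧
      (∀ v, (v ∈ st.1.keys) ↔ 0 < bcount xs m v) ∧ st.1.keys.Nodup := by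
  induction m with
  | zero =>
    refine ⟨fun v => ?_, fun v => ?_, fun v => ?_, ?_⟩
    · simp [lastTwo, prevOcc, PySem.Dict.get?_empty]
    · simp [bcount, PySem.Dict.getD_empty]
    · simp [bcount, PySem.Dict.keys_empty]
    · simp [PySem.Dict.keys_empty]
  | succ m ih =>
    obtain ⟨h1, h2, h3, h4⟩ := ih
    rw [List.range_succ, List.map_append, List.foldl_append]
    simp only [List.map_cons, List.map_nil, List.foldl_cons, List.foldl_nil]
    exact step_inv xs m _ h1 h2 h3 h4

/- ---------- the combinatorial core: acount = bcount ---------- -/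

lemma prevOcc_none_iff (xs : List Int) (v : Int) (m : Nat) :
    prevOcc xs v m = none ↔ ∀ j < m, xs.getD j 0 ≠ v := by
  induction m with
  | zero => simp [prevOcc]
  | succ m ih =>
    simp only [prevOcc]
    split_ifs with h
    · constructor
      · intro hc; cases hc
      · intro hall; exact absurd h (hall m (by omega))
    · rw [ih]
      constructor
      · intro hall j hj
        rcases Nat.lt_succ_iff_lt_or_eq.mp hj with hj' | hj'
        · exact hall j hj'
        · subst hj'; exact h
      · intro hall j hj; exact hall j (by omega)

lemma prevOcc_some_iff (xs : List Int) (v : Int) (m p : Nat) :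
    prevOcc xs v m = some p ↔ (p < m ∧ xs.getD p 0 = v ∧ ∀ j, p < j → j < m → xs.getD j 0 ≠ v) := by
  induction m with
  | zero => simp [prevOcc]
  | succ m ih =>
    simp only [prevOcc]
    split_ifs with h
    · constructor
      · intro hs
        have hpm : p = m := by
          have := Option.some.inj hs; omega
        subst hpm
        exact ⟨by omega, h, fun j hj1 hj2 => by omega⟩
      · rintro ⟨hp, hv, hgap⟩
        have hpm : p = m := by
          by_contra hne
          have hplt : p < m := by omega
          exact hgap m (by omega) (by omega) h
        subst hpm; rfl
    · rw [ih]
      constructor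
      · rintro ⟨hp, hv, hgap⟩
        refine ⟨by omega, hv, fun j hj1 hj2 => ?_⟩
        rcases Nat.lt_succ_iff_lt_or_eq.mp hj2 with hj' | hj'
        · exact hgap j hj1 hj'
        · subst hj'; exact h
      · rintro ⟨hp, hv, hgap⟩
        have hplt : p < m := by
          rcases Nat.lt_succ_iff_lt_or_eq.mp hp with hp' | hp'
          · exact hp'
          · subst hp'; exact absurd hv h
        exact ⟨hplt, hv, fun j hj1 hj2 => hgap j hj1 (by omega)⟩

lemma occ_conv (xs : List Int) (v : Int) (j : Nat) (hj : j < xs.length) :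
    xs.getD j 0 = v ↔ xs[j]? = some v := by
  rw [List.getD_eq_getElem?_getD, List.getElem?_eq_getElem hj]
  simp

lemma count_drop_take (xs : List Int) (v : Int) (a w : Nat) :
    ((xs.drop a).take w).count v = ((Finset.Ico a (a + w)).filter (fun j => xs[j]? = some v)).card := by
  induction w with
  | zero => simp
  | succ w ih =>
    rw [List.take_succ, List.count_append, ih]
    have hIco : Finset.Ico a (a + (w + 1)) = insert (a + w) (Finset.Ico a (a + w)) := by
      ext j; simp only [Finset.mem_Ico, Finset.mem_insert]; omega
    rw [hIco, Finset.filter_insert]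
    have hidx : (xs.drop a)[w]? = xs[a + w]? := by rw [List.getElem?_drop]
    split_ifs with hocc
    · rw [Finset.card_insert_of_notMem (by simp [Finset.mem_filter])]
      rw [hidx, hocc]
      simp
    · rw [hidx]
      cases h2 : xs[a + w]? with
      | none => simp
      | some x =>
        have hxv : ¬ x = v := by rw [h2] at hocc; simpa using hocc
        simp [hxv]

lemma mem_Jset (xs : List Int) (v : Int) (k a : Nat) :
    a ∈ Jset xs v k ↔ xs.getD k 0 = v ∧ ∃ p, prevOcc xs v k = some p ∧
      max (max ((k : Int) - 9) (ppOf xs v p + 1)) 0 ≤ (a : Int) ∧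
      (a : Int) ≤ min (p : Int) ((xs.length : Int) - 3) := by
  unfold Jset
  split_ifs with hv
  · cases hp : prevOcc xs v k with
    | none => simp
    | some p =>
      simp only [hv, true_and]
      split_ifs with hlh
      · rw [Finset.mem_Icc]
        constructor
        · rintro ⟨ha1, ha2⟩
          exact ⟨p, rfl, by omega, by omega⟩
        · rintro ⟨p', hp', h1, h2⟩
          have hppe : p' = p := (Option.some.inj hp').symm
          subst hppe
          omega
      · simp only [Finset.notMem_empty, false_iff]
        rintro ⟨p', hp', h1, h2⟩
        have hppe : p' = p := (Option.some.inj hp').symm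
        subst hppe
        omega
  · simp only [Finset.notMem_empty, false_iff]
    rintro ⟨hgv, -⟩
    exact hv hgv

lemma step_card (xs : List Int) (v : Int) (k : Nat) :
    (if xs.getD k 0 = v then contribAt xs k else 0) = ((Jset xs v k).card : Int) := by
  split_ifs with hv
  · unfold contribAt Jset
    rw [hv, if_pos rfl]
    cases hp : prevOcc xs v k with
    | none => simp
    | some p =>
      show (if max (max ((k : Int) - 9) (ppOf xs v p + 1)) 0 ≤ min (p : Int) ((xs.length : Int) - 3)
            then min (p : Int) ((xs.length : Int) - 3) - max (max ((k : Int) - 9) (ppOf xs v p + 1)) 0 + 1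
            else 0)
          = ((if max (max ((k : Int) - 9) (ppOf xs v p + 1)) 0 ≤ min (p : Int) ((xs.length : Int) - 3)
              then Finset.Icc (max (max ((k : Int) - 9) (ppOf xs v p + 1)) 0).toNat
                (min (p : Int) ((xs.length : Int) - 3)).toNat
              else ∅).card : Int)
      split_ifs with hlh
      · rw [Nat.card_Icc]
        omega
      · simp
  · unfold Jset
    rw [if_neg hv]
    simp

lemma bcount_eq_sum (xs : List Int) (v : Int) (m : Nat) :
    bcount xs m v = ∑ k ∈ Finset.range m, ((Jset xs v k).card : Int) := by
  induction m with
  | zero => simp [bcount]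
  | succ m ih =>
    simp only [bcount]
    rw [ih, Finset.sum_range_succ, step_card]

lemma acount_eq_countP (xs : List Int) (v : Int) :
    acount xs v = (List.range ((xs.length : Int) - 2).toNat).countP (fun (a : Nat) => winPred xs v (a : Int)) := by
  unfold acount winPred
  rw [PySem.List.pyRange_one, List.countP_map]
  simp only [Int.sub_zero]
  apply List.countP_congr
  intro a ha
  simp [Function.comp]

lemma mem_window_iff (xs : List Int) (v : Int) (a : Nat) :
    winPred xs v (a : Int) = true
      ↔ 2 ≤ ((Finset.Ico a (a + 10)).filter (fun j => xs[j]? = some v)).card := by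
  unfold winPred
  have h10 : ((a : Int) + 10) = ((a + 10 : Nat) : Int) := by push_cast; ring
  rw [h10, PySem.List.slice_natCast]
  have hsub : a + 10 - a = 10 := by omega
  rw [hsub, PySem.List.count_eq, count_drop_take xs v a 10]
  simp only [decide_eq_true_eq]
  constructor
  · intro h; exact_mod_cast h
  · intro h; exact_mod_cast h

lemma S_eq_biUnion (xs : List Int) (v : Int) :
    ((List.range ((xs.length : Int) - 2).toNat).filter (fun (a : Nat) => winPred xs v (a : Int))).toFinset
      = (Finset.range xs.length).biUnion (Jset xs v) := by
  ext a
  simp only [List.mem_toFinset, List.mem_filter, List.mem_range, Finset.mem_biUnion, Finset.mem_range]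
  constructor
  · rintro ⟨ha, hw⟩
    rw [mem_window_iff] at hw
    set T := (Finset.Ico a (a + 10)).filter (fun j => xs[j]? = some v) with hT
    have hTne : T.Nonempty := Finset.card_pos.mp (by omega)
    set q := T.min' hTne with hq
    have hqT : q ∈ T := Finset.min'_mem _ _
    have hTe : (T.erase q).Nonempty := by
      rw [← Finset.card_pos, Finset.card_erase_of_mem hqT]; omega
    set k := (T.erase q).min' hTe with hk
    have hkT' : k ∈ T.erase q := Finset.min'_mem _ _
    have hkT : k ∈ T := Finset.mem_of_mem_erase hkT'
    have hkq : k ≠ q := Finset.ne_of_mem_erase hkT'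
    have hqk : q < k := lt_of_le_of_ne (Finset.min'_le _ _ hkT) (Ne.symm hkq)
    have hkIco := Finset.mem_Ico.mp (Finset.mem_filter.mp hkT).1
    have hkocc : xs[k]? = some v := (Finset.mem_filter.mp hkT).2
    have hqIco := Finset.mem_Ico.mp (Finset.mem_filter.mp hqT).1
    have hqocc : xs[q]? = some v := (Finset.mem_filter.mp hqT).2
    have hklen : k < xs.length := by
      rcases List.getElem?_eq_some_iff.mp hkocc with ⟨h, _⟩; exact h
    have hqlen : q < xs.length := by
      rcases List.getElem?_eq_some_iff.mp hqocc with ⟨h, _⟩; exact h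
    have hkv : xs.getD k 0 = v := (occ_conv xs v k hklen).mpr hkocc
    have hqv : xs.getD q 0 = v := (occ_conv xs v q hqlen).mpr hqocc
    have hprev : prevOcc xs v k = some q := by
      rw [prevOcc_some_iff]
      refine ⟨hqk, hqv, fun j hj1 hj2 hjv => ?_⟩
      have hjlen : j < xs.length := by omega
      have hjocc : xs[j]? = some v := (occ_conv xs v j hjlen).mp hjv
      have hjT : j ∈ T := by
        rw [hT]; exact Finset.mem_filter.mpr ⟨Finset.mem_Ico.mpr ⟨by omega, by omega⟩, hjocc⟩
      have hjT' : j ∈ T.erase q := Finset.mem_erase.mpr ⟨by omega, hjT⟩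
      have := Finset.min'_le _ _ hjT'
      omega
    refine ⟨k, hklen, ?_⟩
    rw [mem_Jset]
    refine ⟨hkv, q, hprev, ?_, ?_⟩
    · have hppa : ppOf xs v q < (a : Int) := by
        unfold ppOf
        cases hr : prevOcc xs v q with
        | none =>
          show (-1 : Int) < (a : Int)
          omega
        | some r =>
          show (r : Int) < (a : Int)
          rw [prevOcc_some_iff] at hr
          obtain ⟨hrq, hrv, -⟩ := hr
          by_contra hge
          push_neg at hge
          have hra : a ≤ r := by exact_mod_cast hge
          have hrlen : r < xs.length := by omega
          have hrocc : xs[r]? = some v := (occ_conv xs v r hrlen).mp hrv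
          have hrT : r ∈ T := by
            rw [hT]; exact Finset.mem_filter.mpr ⟨Finset.mem_Ico.mpr ⟨hra, by omega⟩, hrocc⟩
          have := Finset.min'_le _ _ hrT
          omega
      rw [max_le_iff, max_le_iff]
      refine ⟨⟨by omega, by omega⟩, by omega⟩
    · rw [le_min_iff]
      constructor
      · exact_mod_cast hqIco.1
      · omega
  · rintro ⟨k, hk, haJ⟩
    rw [mem_Jset] at haJ
    obtain ⟨hkv, p, hp, hlo, hhi⟩ := haJ
    rw [max_le_iff, max_le_iff] at hlo
    rw [le_min_iff] at hhi
    rw [prevOcc_some_iff] at hp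
    obtain ⟨hpk, hpv, -⟩ := hp
    have hplen : p < xs.length := by omega
    refine ⟨by omega, ?_⟩
    rw [mem_window_iff]
    have h1 : p ∈ (Finset.Ico a (a + 10)).filter (fun j => xs[j]? = some v) := by
      refine Finset.mem_filter.mpr ⟨Finset.mem_Ico.mpr ⟨by omega, by omega⟩, (occ_conv xs v p hplen).mp hpv⟩
    have h2 : k ∈ (Finset.Ico a (a + 10)).filter (fun j => xs[j]? = some v) := by
      refine Finset.mem_filter.mpr ⟨Finset.mem_Ico.mpr ⟨by omega, by omega⟩, (occ_conv xs v k hk).mp hkv⟩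
    exact Finset.one_lt_card.mpr ⟨p, h1, k, h2, by omega⟩

lemma J_not_both (xs : List Int) (v : Int) {k k' a : Nat} (hkk : k < k')
    (h1 : a ∈ Jset xs v k) (h2 : a ∈ Jset xs v k') : False := by
  rw [mem_Jset] at h1 h2
  obtain ⟨hkv, p, hp, hlo, hhi⟩ := h1
  obtain ⟨hkv', p', hp', hlo', hhi'⟩ := h2
  have hps := (prevOcc_some_iff xs v k p).mp hp
  have hps' := (prevOcc_some_iff xs v k' p').mp hp'
  obtain ⟨hpk, hpv, hgap⟩ := hps
  obtain ⟨hpk', hpv', hgap'⟩ := hps'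
  rw [max_le_iff, max_le_iff] at hlo hlo'
  rw [le_min_iff] at hhi hhi'
  have hkp' : k ≤ p' := by
    by_contra h
    push_neg at h
    exact hgap' k h hkk hkv
  rcases Nat.eq_or_lt_of_le hkp' with he | hlt
  · have hpek : prevOcc xs v p' = some p := by
      rw [← he]
      exact hp
    have hppv : ppOf xs v p' = (p : Int) := by unfold ppOf; rw [hpek]
    rw [hppv] at hlo'
    omega
  · cases hr : prevOcc xs v p' with
    | none =>
      rw [prevOcc_none_iff] at hr
      exact hr k hlt hkv
    | some r =>
      have hrs := (prevOcc_some_iff xs v p' r).mp hr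
      obtain ⟨hrp', hrv, hrgap⟩ := hrs
      have hkr : k ≤ r := by
        by_contra h
        push_neg at h
        exact hrgap k h hlt hkv
      have hppv : ppOf xs v p' = (r : Int) := by unfold ppOf; rw [hr]
      rw [hppv] at hlo'
      omega

lemma J_disjoint (xs : List Int) (v : Int) :
    (↑(Finset.range xs.length) : Set ℕ).PairwiseDisjoint (Jset xs v) := by
  intro k _ k' _ hne
  simp only [Function.onFun]
  rw [Finset.disjoint_left]
  intro a ha ha'
  rcases lt_or_gt_of_ne hne with h | h
  · exact J_not_both xs v h ha ha'
  · exact J_not_both xs v h ha' ha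

lemma core_eq (xs : List Int) (v : Int) : (acount xs v : Int) = bcount xs xs.length v := by
  rw [bcount_eq_sum, acount_eq_countP, List.countP_eq_length_filter]
  have hnd : ((List.range ((xs.length : Int) - 2).toNat).filter
      (fun (a : Nat) => winPred xs v (a : Int))).Nodup := List.nodup_range.filter _
  rw [← List.toFinset_card_of_nodup hnd, S_eq_biUnion, Finset.card_biUnion (J_disjoint xs v)]
  push_cast
  rfl

/- ---------- sorting: sorted2 with key (-c, v) is sorted with an injective lex key ---------- -/

lemma sorted2_eq_sorted_lex (l : List (Int × Int)) :
    PySem.List.sorted2 l (fun kv => -kv.2) (fun kv => kv.1)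
      = PySem.List.sorted l (fun kv => toLex (-kv.2, kv.1)) := by
  rw [PySem.List.sorted_eq_foldl_insertBy]
  unfold PySem.List.sorted2
  simp only [Bool.false_eq_true, if_false]
  have hb : (fun (a b : Int × Int) =>
        (decide (-a.2 < -b.2) || (!decide (-b.2 < -a.2) && decide (a.1 < b.1))))
      = (fun (a b : Int × Int) => decide (toLex (-a.2, a.1) < toLex (-b.2, b.1))) := by
    funext a b
    rw [Bool.eq_iff_iff]
    simp only [Bool.or_eq_true, Bool.and_eq_true, Bool.not_eq_true', decide_eq_true_eq,
      decide_eq_false_iff_not, Prod.Lex.toLex_lt_toLex]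
    omega
  rw [hb]

lemma lex_key_injective : Function.Injective (fun kv : Int × Int => toLex (-kv.2, kv.1)) := by
  intro a b h
  simp only at h
  have h2 : ((-a.2, a.1) : Int × Int) = (-b.2, b.1) := by
    have := congrArg ofLex h
    simpa using this
  rw [Prod.mk.injEq] at h2
  rw [Prod.ext_iff]
  exact ⟨h2.2, by omega⟩

/- ---------- assembly ---------- -/

def dictA (xs : List Int) : PySem.Dict Int Int :=
  (PySem.List.pyRange 0 ((xs.length : Int) - 2) 1).foldl
    (fun counts i => pvInnerA (PySem.List.slice xs (some i) (some (i + 10))) counts)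
    PySem.Dict.empty

def dictB (xs : List Int) : PySem.Dict Int Int :=
  ((PySem.List.enumerate xs).foldl (pvStepB (xs.length : Int)) (PySem.Dict.empty, PySem.Dict.empty)).1

lemma find_anchors_def (xs : List Int) :
    find_anchors xs = ((PySem.List.sorted2 (dictA xs).items (fun x => -x.2) (fun x => x.1)).take 6).map (fun p => p.1) := rfl

lemma find_anchors_alt_def (xs : List Int) :
    find_anchors_alt xs = ((PySem.List.sorted2 (dictB xs).items (fun kv => -kv.2) (fun kv => kv.1)).take 6).map (fun kv => kv.1) := rfl

lemma dictB_eq (xs : List Int) :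
    dictB xs = (((List.range xs.length).map (fun (j : Nat) => ((j : Int), xs.getD j 0))).foldl
      (pvStepB (xs.length : Int)) (PySem.Dict.empty, PySem.Dict.empty)).1 := by
  unfold dictB
  rw [enumerate_eq_map_range xs 0]
  have : (fun (j : Nat) => ((0 : Int) + (j : Int), xs.getD j 0)) = fun (j : Nat) => ((j : Int), xs.getD j 0) := by
    funext j; simp
  rw [this]

lemma acount_winPred (xs : List Int) (v : Int) :
    acount xs v = (PySem.List.pyRange 0 ((xs.length : Int) - 2) 1).countP (winPred xs v) := rfl

lemma dictA_getD (xs : List Int) (v : Int) : (dictA xs).getD v 0 = (acount xs v : Int) := by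
  unfold dictA
  rw [afold_getD, acount_winPred]
  simp

lemma dictA_mem (xs : List Int) (v : Int) : (v ∈ (dictA xs).keys) ↔ 0 < acount xs v := by
  unfold dictA
  rw [afold_mem, acount_winPred]
  simp

lemma dictA_nodup (xs : List Int) : (dictA xs).keys.Nodup := by
  unfold dictA
  exact afold_nodup _ _ _ (by simp)

lemma dictB_getD (xs : List Int) (v : Int) : (dictB xs).getD v 0 = bcount xs xs.length v := by
  rw [dictB_eq]
  exact (bfold_inv xs xs.length).2.1 v

lemma dictB_mem (xs : List Int) (v : Int) : (v ∈ (dictB xs).keys) ↔ 0 < bcount xs xs.length v := by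
  rw [dictB_eq]
  exact (bfold_inv xs xs.length).2.2.1 v

lemma dictB_nodup (xs : List Int) : (dictB xs).keys.Nodup := by
  rw [dictB_eq]
  exact (bfold_inv xs xs.length).2.2.2

lemma items_perm (xs : List Int) : (dictA xs).items.Perm (dictB xs).items := by
  have hkeys : (dictA xs).keys.Perm (dictB xs).keys := by
    rw [List.perm_ext_iff_of_nodup (dictA_nodup xs) (dictB_nodup xs)]
    intro v
    rw [dictA_mem, dictB_mem]
    have := core_eq xs v
    omega
  rw [PySem.Dict.items_eq_map_keys _ (dictA_nodup xs) 0,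
      PySem.Dict.items_eq_map_keys _ (dictB_nodup xs) 0]
  have hfun : (fun k => (k, (dictA xs).getD k 0)) = (fun k => (k, (dictB xs).getD k 0)) := by
    funext k
    rw [dictA_getD, dictB_getD, core_eq]
  rw [hfun]
  exact hkeys.map _

theorem find_anchors_eq (numbers : List Int) : find_anchors numbers = find_anchors_alt numbers := by
  rw [find_anchors_def, find_anchors_alt_def]
  rw [sorted2_eq_sorted_lex, sorted2_eq_sorted_lex]
  rw [PySem.List.sorted_eq_sorted_of_perm _ _ _ lex_key_injective (items_perm numbers)]

-- ===== VERDICT (by name: the statement is the Claim_ definition above) =====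
theorem find_anchors_spec : Claim_equal_find_anchors := by
  intro numbers _
  unfold Spec_find_anchors
  exact find_anchors_eq numbers
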